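-- pv_equiv track=rewrite | github.com/MrZLeviatan/Analizador_Lexico_Prolog | src/tokens/identificadores.py | es_variable
-- ===== SOURCE A (Python) =====
-- LETRAS_MAYUS = [
--     'A','B','C','D','E','F','G','H','I','J','K','L',
--     'M','N','O','P','Q','R','S','T','U','V','W','X','Y','Z'
-- ]
--
-- LETRAS_MINUS = [
--     'a','b','c','d','e','f','g','h','i','j','k','l',
--     'm','n','o','p','q','r','s','t','u','v','w','x','y','z'
-- ]
--
-- DIGITOS = ['0','1','2','3','4','5','6','7','8','9']
--
-- GUION_BAJO = '_'
--
-- def es_variable(cadena: str) -> bool: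
--     """
--     Verifica si una cadena es una variable en Prolog.
--     - Debe comenzar con letra mayúscula o '_'
--     - Puede tener letras, dígitos o '_' después
--     - Máximo 10 caracteres
--     """
--
--     if len(cadena) == 0 or len(cadena) > 10:
--         return False
--
--     primer = cadena[0]
--
--     # Verificar primer carácter: letra mayúscula o guion bajo
--     primero_valido = False
--     if primer == GUION_BAJO:
--         primero_valido = True
--     else:
--         for letra in LETRAS_MAYUS:
--             if primer == letra:
--                 primero_valido = True
--                 break
--
--     if not primero_valido:
--         return False
--
--     # Verificar caracteres restantes: mayúsculas, minúsculas, dígitos o guion bajo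
--     for c in cadena[1:]:
--         valido = False
--
--         for letra in LETRAS_MAYUS:
--             if c == letra:
--                 valido = True
--                 break
--
--         if not valido:
--             for letra in LETRAS_MINUS:
--                 if c == letra:
--                     valido = True
--                     break
--
--         if not valido:
--             for d in DIGITOS:
--                 if c == d:
--                     valido = True
--                     break
--
--         if not valido and c == GUION_BAJO:
--             valido = True
--
--         if not valido:
--             return False
--
--     return True
-- ===== SOURCE B (Python) =====
-- def es_variable(cadena: str) -> bool:
--     # Three-state DFA: 0 = start, 1 = accepting (after a valid prefix), 2 = dead.
--     START, BODY, DEAD = 0, 1, 2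
--
--     def delta(state, c):
--         if state == DEAD:
--             return DEAD
--         if state == START:
--             return BODY if (c == '_' or 'A' <= c <= 'Z') else DEAD
--         return BODY if ('A' <= c <= 'Z' or 'a' <= c <= 'z'
--                         or '0' <= c <= '9' or c == '_') else DEAD
--
--     state = START
--     for c in cadena:
--         state = delta(state, c)
--     return state == BODY and len(cadena) <= 10
-- ===== Notes on version B (the rewrite author's own statement) =====
-- stated objective: alternative
-- what changed: Replaced A's staged validation (length guard, first-char membership scans over hard-coded letter lists, then a per-character flag loop over the tail with three inner list scans) by a three-state finite automaton: a single transition function folded over the whole string, accepting iff the final state is the accept state and the length is at most 10.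
import Mathlib
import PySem

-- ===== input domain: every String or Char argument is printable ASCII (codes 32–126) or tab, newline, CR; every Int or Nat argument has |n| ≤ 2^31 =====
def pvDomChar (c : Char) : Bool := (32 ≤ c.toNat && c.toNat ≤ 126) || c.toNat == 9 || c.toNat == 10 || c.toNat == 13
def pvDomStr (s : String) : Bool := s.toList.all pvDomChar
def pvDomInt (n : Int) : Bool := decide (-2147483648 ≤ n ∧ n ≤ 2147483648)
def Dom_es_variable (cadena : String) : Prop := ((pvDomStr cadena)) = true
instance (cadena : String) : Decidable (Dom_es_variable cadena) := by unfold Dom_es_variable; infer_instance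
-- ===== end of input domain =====

-- B replaces A's staged validation (length guard, membership scans over hard-coded
-- letter lists for the first char, then a flag loop with three inner scans for the
-- tail) by a three-state DFA folded once over the whole string (alternative).

-- ===== PORT A =====
def pvLETRAS_MAYUS : List Char :=
  ['A','B','C','D','E','F','G','H','I','J','K','L',
   'M','N','O','P','Q','R','S','T','U','V','W','X','Y','Z']

def pvLETRAS_MINUS : List Char :=
  ['a','b','c','d','e','f','g','h','i','j','k','l',
   'm','n','o','p','q','r','s','t','u','v','w','x','y','z']

def pvDIGITOS : List Char := ['0','1','2','3','4','5','6','7','8','9']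

-- 'for letra in L: if c == letra: valido = True; break' as a scan with early exit
def pvScan (c : Char) : List Char → Bool
  | [] => false
  | x :: xs => if c = x then true else pvScan c xs

-- the final for-loop over cadena[1:] with its per-character flag 'valido'
def pvResto : List Char → Bool
  | [] => true
  | c :: rest =>
    let valido := pvScan c pvLETRAS_MAYUS
    let valido := if !valido then pvScan c pvLETRAS_MINUS else valido
    let valido := if !valido then pvScan c pvDIGITOS else valido
    let valido := if !valido && c = '_' then true else valido
    if !valido then false else pvResto rest

def es_variable (cadena : String) : Bool :=
  let cs := cadena.toList
  if cs.length = 0 ∨ cs.length > 10 then false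
  else
    match cs with
    | [] => false
    | primer :: rest =>
      let primero_valido := if primer = '_' then true else pvScan primer pvLETRAS_MAYUS
      if !primero_valido then false else pvResto rest

-- ===== PORT B =====
-- DFA transition: state 0 = start, 1 = accepting, 2 = dead
def pvDelta (state : Nat) (c : Char) : Nat :=
  if state = 2 then 2
  else if state = 0 then
    (if c = '_' || ('A' ≤ c && c ≤ 'Z') then 1 else 2)
  else
    (if ('A' ≤ c && c ≤ 'Z') || ('a' ≤ c && c ≤ 'z') || ('0' ≤ c && c ≤ '9') || c = '_'
     then 1 else 2)

def es_variable_alt (cadena : String) : Bool :=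
  (cadena.toList.foldl pvDelta 0 == 1) && (cadena.toList.length ≤ 10)

-- ===== PRECONDITION & SPEC =====
def Spec_es_variable (cadena : String) (out : Bool) : Prop := out = es_variable_alt cadena
instance (cadena : String) (out : Bool) : Decidable (Spec_es_variable cadena out) := by unfold Spec_es_variable; infer_instance

-- ===== CLAIM (what is proved, stated in full; the proofs are below) =====
def Claim_equal_es_variable : Prop := ∀ (cadena : String), Dom_es_variable cadena → Spec_es_variable cadena (es_variable cadena)

-- ===== LEMMAS AND PROOFS =====
theorem char_eq_iff (a b : Char) : a = b ↔ a.toNat = b.toNat := eq_iff_eq_of_cmp_eq_cmp rfl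

theorem char_toNat_inj : Function.Injective Char.toNat := fun a b h => (char_eq_iff a b).mpr h

theorem pvScan_eq_contains (c : Char) (l : List Char) : pvScan c l = l.contains c := by
  induction l with
  | nil => rfl
  | cons x xs ih => by_cases h : c = x <;> simp [pvScan, h, ih]

theorem pvScan_range (c : Char) (l : List Char) (lo hi : Nat) (hlohi : lo ≤ hi)
    (hmap : l.map Char.toNat = List.range' lo (hi + 1 - lo)) :
    pvScan c l = (decide (lo ≤ c.toNat) && decide (c.toNat ≤ hi)) := by
  rw [pvScan_eq_contains, Bool.eq_iff_iff]
  simp only [List.contains_iff_mem, Bool.and_eq_true, decide_eq_true_eq]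
  rw [← List.mem_map_of_injective char_toNat_inj, hmap, List.mem_range'_1]
  omega

theorem pvScan_mayus (c : Char) : pvScan c pvLETRAS_MAYUS = ('A' ≤ c && c ≤ 'Z') := by
  simpa using pvScan_range c pvLETRAS_MAYUS 65 90 (by omega) (by decide)

theorem pvScan_minus (c : Char) : pvScan c pvLETRAS_MINUS = ('a' ≤ c && c ≤ 'z') := by
  simpa using pvScan_range c pvLETRAS_MINUS 97 122 (by omega) (by decide)

theorem pvScan_digitos (c : Char) : pvScan c pvDIGITOS = ('0' ≤ c && c ≤ '9') := by
  simpa using pvScan_range c pvDIGITOS 48 57 (by omega) (by decide)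

def pvTailOk (c : Char) : Bool :=
  ('A' ≤ c && c ≤ 'Z') || ('a' ≤ c && c ≤ 'z') || ('0' ≤ c && c ≤ '9') || c = '_'

theorem foldl_delta_dead (cs : List Char) : cs.foldl pvDelta 2 = 2 := by
  induction cs with
  | nil => rfl
  | cons c rest ih => simpa [pvDelta] using ih

theorem delta_one (c : Char) : pvDelta 1 c = if pvTailOk c then 1 else 2 := by
  simp [pvDelta, pvTailOk]

theorem delta_zero (c : Char) :
    pvDelta 0 c = if (c = '_' || ('A' ≤ c && c ≤ 'Z')) then 1 else 2 := by
  simp [pvDelta]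

theorem foldl_delta_body (cs : List Char) :
    cs.foldl pvDelta 1 = if cs.all pvTailOk then 1 else 2 := by
  induction cs with
  | nil => rfl
  | cons c rest ih =>
    rw [List.foldl_cons, delta_one]
    by_cases h : pvTailOk c
    · simp [h, ih]
    · simp [h, foldl_delta_dead]

theorem char_le_iff (a b : Char) : a ≤ b ↔ a.toNat ≤ b.toNat := Iff.rfl

theorem char_lt_iff (a b : Char) : a < b ↔ a.toNat < b.toNat := Iff.rfl

theorem pvResto_eq_all (cs : List Char) : pvResto cs = cs.all pvTailOk := by
  induction cs with
  | nil => rfl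
  | cons c rest ih =>
    simp only [pvResto, pvScan_mayus, pvScan_minus, pvScan_digitos, List.all_cons, ← ih, pvTailOk]
    split_ifs <;> simp_all <;>
      (intro hcontra; exfalso;
       simp only [char_le_iff, char_lt_iff, char_eq_iff, Char.reduceToNat] at *; omega)

-- ===== VERDICT (by name: the statement is the Claim_ definition above) =====
theorem es_variable_spec : Claim_equal_es_variable := by
  intro cadena _
  unfold Spec_es_variable es_variable es_variable_alt
  cases h : cadena.toList with
  | nil => simp
  | cons c rest =>
    have hfirsteq : (if c = '_' then true else pvScan c pvLETRAS_MAYUS)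
        = (c = '_' || ('A' ≤ c && c ≤ 'Z')) := by
      by_cases hc : c = '_' <;> simp [hc, pvScan_mayus]
    simp only [List.length_cons, List.foldl_cons, hfirsteq, pvResto_eq_all, delta_zero]
    by_cases hf : (c = '_' || ('A' ≤ c && c ≤ 'Z')) = true
    · rw [if_pos hf, foldl_delta_body, hf]
      by_cases hlen : rest.length + 1 ≤ 10
      · rw [if_neg (by omega : ¬(rest.length + 1 = 0 ∨ rest.length + 1 > 10))]
        by_cases hall : rest.all pvTailOk <;> simp [hall, hlen]
      · rw [if_pos (by omega : rest.length + 1 = 0 ∨ rest.length + 1 > 10)]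
        by_cases hall : rest.all pvTailOk <;> simp [hall, hlen]
    · rw [if_neg hf, foldl_delta_dead]
      have hb : (c = '_' || ('A' ≤ c && c ≤ 'Z')) = false := by simpa using hf
      rw [hb]
      split_ifs <;> simp_all
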